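-- pv_equiv track=rewrite | github.com/Monacrh/SPOK-Validation-Check | TubesSPOK.py | subject
-- ===== SOURCE A (Python) =====
-- def subject(sentence):
--     def change_state(early_state, character):
--         last_state = "reject"
--
--         if early_state == "q0":
--             if character == "a":
--                 last_state = "q1"
--             elif character == "k":
--                 last_state = "q3"
--             elif character == "d":
--                 last_state = "q6"
--             elif character == "m":
--                 last_state = "q8"
--
--         if early_state == "q1":
--             if character == "k":
--                 last_state = "q2"
--
--         if early_state == "q2":
--             if character == "u":
--                 last_state = "q12"
--
--         if early_state == "q3":
--             if character == "a":
--                 last_state = "q4"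
--             elif character == "i":
--                 last_state = "q5"
--
--         if early_state == "q4":
--             if character == "m":
--                 last_state = "q2"
--
--         if early_state == "q5":
--             if character == "t":
--                 last_state = "q7"
--
--         if early_state == "q7":
--             if character == "a":
--                 last_state = "q12"
--
--         if early_state == "q6":
--             if character == "i":
--                 last_state = "q7"
--
--         if early_state == "q8":
--             if character == "e":
--                 last_state = "q9"
--
--         if early_state == "q9":
--             if character == "r":
--                 last_state = "q10"
--
--         if early_state == "q10":
--             if character == "e":
--                 last_state = "q11"
--
--         if early_state == "q11":
--             if character == "k":
--                 last_state = "q7"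
--         return last_state
--
--     state = "q0"
--     word = ""
--     i = 0
--
--     while state != "reject" and i < len(sentence):
--         state = change_state(state, sentence[i])
--         word += sentence[i]
--         i += 1
--
--     if state == "q12":
--         isSubject = True
--     else:
--         isSubject = False
--
--     return word, isSubject
-- ===== SOURCE B (Python) =====
-- def subject(sentence):
--     words = ["aku", "kamu", "kita", "dia", "mereka"]
--     word = ""
--     for ch in sentence:
--         word += ch
--         if not any(w.startswith(word) for w in words):
--             break
--     return word, word in words
-- ===== Notes on version B (the rewrite author's own statement) =====
-- stated objective: simpler
-- what changed: Replaces the hand-written 13-state DFA transition function with prefix matching against the explicit list of the five accepted words (append each char, break as soon as the accumulated word is no longer a prefix of any candidate, then test membership).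
import Mathlib
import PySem

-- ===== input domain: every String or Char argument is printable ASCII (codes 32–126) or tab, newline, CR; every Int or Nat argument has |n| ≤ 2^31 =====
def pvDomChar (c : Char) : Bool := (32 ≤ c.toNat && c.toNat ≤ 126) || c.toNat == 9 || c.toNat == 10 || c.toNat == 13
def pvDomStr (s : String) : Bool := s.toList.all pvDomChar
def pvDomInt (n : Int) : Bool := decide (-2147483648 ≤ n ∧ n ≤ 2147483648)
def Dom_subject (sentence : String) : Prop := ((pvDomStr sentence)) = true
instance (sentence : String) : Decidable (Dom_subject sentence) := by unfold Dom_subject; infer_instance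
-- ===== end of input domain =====

-- B replaces the hand-written DFA with prefix matching over the five accepted words (simpler).

-- ===== PORT A =====
-- the inner helper change_state, branch for branch
def changeState (earlyState : String) (character : Char) : String :=
  let lastState := "reject"
  let lastState := if earlyState == "q0" then
      (if character == 'a' then "q1"
       else if character == 'k' then "q3"
       else if character == 'd' then "q6"
       else if character == 'm' then "q8" else lastState) else lastState
  let lastState := if earlyState == "q1" then
      (if character == 'k' then "q2" else lastState) else lastState
  let lastState := if earlyState == "q2" then
      (if character == 'u' then "q12" else lastState) else lastState
  let lastState := if earlyState == "q3" then
      (if character == 'a' then "q4"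
       else if character == 'i' then "q5" else lastState) else lastState
  let lastState := if earlyState == "q4" then
      (if character == 'm' then "q2" else lastState) else lastState
  let lastState := if earlyState == "q5" then
      (if character == 't' then "q7" else lastState) else lastState
  let lastState := if earlyState == "q7" then
      (if character == 'a' then "q12" else lastState) else lastState
  let lastState := if earlyState == "q6" then
      (if character == 'i' then "q7" else lastState) else lastState
  let lastState := if earlyState == "q8" then
      (if character == 'e' then "q9" else lastState) else lastState
  let lastState := if earlyState == "q9" then
      (if character == 'r' then "q10" else lastState) else lastState
  let lastState := if earlyState == "q10" then
      (if character == 'e' then "q11" else lastState) else lastState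
  let lastState := if earlyState == "q11" then
      (if character == 'k' then "q7" else lastState) else lastState
  lastState

-- the while loop: state, accumulated word, remaining characters of the sentence
def subjectLoop (state : String) (word : List Char) : List Char → String × List Char
  | [] => (state, word)
  | c :: rest =>
      if state == "reject" then (state, word)
      else subjectLoop (changeState state c) (word ++ [c]) rest

def subject (sentence : String) : String × Bool :=
  let (state, word) := subjectLoop "q0" [] sentence.toList
  (String.ofList word, state == "q12")

-- ===== PORT B =====
def bWords : List String := ["aku", "kamu", "kita", "dia", "mereka"]

-- 'word is still a prefix of some accepted word' (any(w.startswith(word)))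
def bViable (word : List Char) : Bool :=
  bWords.any (fun w => PySem.Str.startswith w (String.ofList word))

-- the for loop with early break: append, then break if no longer viable
def bLoop (word : List Char) : List Char → List Char
  | [] => word
  | c :: rest =>
      let word' := word ++ [c]
      if bViable word' then bLoop word' rest else word'

def subject_alt (sentence : String) : String × Bool :=
  let word := bLoop [] sentence.toList
  (String.ofList word, bWords.contains (String.ofList word))

-- ===== PRECONDITION & SPEC =====
def Spec_subject (sentence : String) (out : String × Bool) : Prop := out = subject_alt sentence
instance (sentence : String) (out : String × Bool) : Decidable (Spec_subject sentence out) := by unfold Spec_subject; infer_instance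

-- ===== CLAIM (what is proved, stated in full; the proofs are below) =====
def Claim_equal_subject : Prop := ∀ (sentence : String), Dom_subject sentence → Spec_subject sentence (subject sentence)

-- ===== LEMMAS AND PROOFS =====

-- invariant: the DFA state matches the accumulated (viable) prefix
def R (state : String) (word : List Char) : Bool :=
  (state == "q0" && word == []) ||
  (state == "q1" && word == ['a']) ||
  (state == "q2" && (word == ['a','k'] || word == ['k','a','m'])) ||
  (state == "q3" && word == ['k']) ||
  (state == "q4" && word == ['k','a']) ||
  (state == "q5" && word == ['k','i']) ||
  (state == "q6" && word == ['d']) ||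
  (state == "q7" && (word == ['k','i','t'] || word == ['d','i'] || word == ['m','e','r','e','k'])) ||
  (state == "q8" && word == ['m']) ||
  (state == "q9" && word == ['m','e']) ||
  (state == "q10" && word == ['m','e','r']) ||
  (state == "q11" && word == ['m','e','r','e']) ||
  (state == "q12" && (word == ['a','k','u'] || word == ['k','a','m','u'] || word == ['k','i','t','a'] || word == ['d','i','a'] || word == ['m','e','r','e','k','a']))

theorem R_ne_reject {state : String} {word : List Char} (h : R state word = true) :
    (state == "reject") = false := by
  simp only [R, Bool.or_eq_true, Bool.and_eq_true, beq_iff_eq, or_assoc] at h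
  rcases h with ⟨rfl,_⟩|⟨rfl,_⟩|⟨rfl,_⟩|⟨rfl,_⟩|⟨rfl,_⟩|⟨rfl,_⟩|⟨rfl,_⟩|⟨rfl,_⟩|⟨rfl,_⟩|⟨rfl,_⟩|⟨rfl,_⟩|⟨rfl,_⟩|⟨rfl,_⟩ <;> decide

theorem R_final {state : String} {word : List Char} (h : R state word = true) :
    (state == "q12") = bWords.contains (String.ofList word) := by
  simp only [R, Bool.or_eq_true, Bool.and_eq_true, beq_iff_eq, or_assoc] at h
  rcases h with ⟨rfl,rfl⟩|⟨rfl,rfl⟩|⟨rfl,h⟩|⟨rfl,rfl⟩|⟨rfl,rfl⟩|⟨rfl,rfl⟩|⟨rfl,rfl⟩|⟨rfl,h⟩|⟨rfl,rfl⟩|⟨rfl,rfl⟩|⟨rfl,rfl⟩|⟨rfl,rfl⟩|⟨rfl,h⟩ <;>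
    first
      | decide
      | (rcases h with rfl|rfl <;> decide)
      | (rcases h with rfl|rfl|rfl <;> decide)
      | (rcases h with rfl|rfl|rfl|rfl|rfl <;> decide)

-- one DFA step agrees with the prefix test
theorem R_step (state : String) (word : List Char) (c : Char) (h : R state word = true) :
    (bViable (word ++ [c]) = true → R (changeState state c) (word ++ [c]) = true) ∧
    (bViable (word ++ [c]) = false → changeState state c = "reject") := by
  simp only [R, Bool.or_eq_true, Bool.and_eq_true, beq_iff_eq, or_assoc] at h
  rcases h with ⟨rfl,rfl⟩|⟨rfl,rfl⟩|⟨rfl,h⟩|⟨rfl,rfl⟩|⟨rfl,rfl⟩|⟨rfl,rfl⟩|⟨rfl,rfl⟩|⟨rfl,h⟩|⟨rfl,rfl⟩|⟨rfl,rfl⟩|⟨rfl,rfl⟩|⟨rfl,rfl⟩|⟨rfl,h⟩ <;>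
    try rcases h with rfl|rfl|rfl|rfl|rfl
  all_goals constructor <;> intro hv <;>
    simp [bViable, bWords, PySem.Chars.startswith, List.isPrefixOf] at hv <;>
    first
      | (rcases hv with rfl|rfl|rfl|rfl <;> decide)
      | (rcases hv with rfl|rfl <;> decide)
      | (obtain rfl := hv; decide)
      | (simp [changeState, hv])

-- once the state is "reject" the loop stops immediately
theorem subjectLoop_reject (word : List Char) (rest : List Char) :
    subjectLoop "reject" word rest = ("reject", word) := by
  cases rest <;> rfl

-- a non-viable word is not one of the accepted words
theorem reject_word_not_mem (word : List Char) (h : bViable word = false) :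
    bWords.contains (String.ofList word) = false := by
  by_contra hc
  simp only [Bool.not_eq_false, bWords, List.contains_eq_mem, decide_eq_true_eq,
    List.mem_cons, List.not_mem_nil, or_false] at hc
  have hw : word = ['a','k','u'] ∨ word = ['k','a','m','u'] ∨ word = ['k','i','t','a'] ∨
      word = ['d','i','a'] ∨ word = ['m','e','r','e','k','a'] := by
    rcases hc with hc|hc|hc|hc|hc
    · exact Or.inl (by have := congrArg String.toList hc; simpa using this)
    · exact Or.inr (Or.inl (by have := congrArg String.toList hc; simpa using this))
    · exact Or.inr (Or.inr (Or.inl (by have := congrArg String.toList hc; simpa using this)))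
    · exact Or.inr (Or.inr (Or.inr (Or.inl (by have := congrArg String.toList hc; simpa using this))))
    · exact Or.inr (Or.inr (Or.inr (Or.inr (by have := congrArg String.toList hc; simpa using this))))
  rcases hw with rfl|rfl|rfl|rfl|rfl <;> revert h <;> decide

-- main loop invariant: both loops produce the same word, and the DFA's
-- acceptance test matches membership in the accepted-word list
theorem loop_eq (rest : List Char) : ∀ (state : String) (word : List Char), R state word = true →
    (subjectLoop state word rest).2 = bLoop word rest ∧
    ((subjectLoop state word rest).1 == "q12")
      = bWords.contains (String.ofList (bLoop word rest)) := by
  induction rest with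
  | nil => exact fun state word h => ⟨rfl, R_final h⟩
  | cons c t ih =>
    intro state word h
    have hne := R_ne_reject h
    have hstep := R_step state word c h
    by_cases hb : bViable (word ++ [c]) = true
    · simpa [subjectLoop, bLoop, hne, hb] using ih (changeState state c) (word ++ [c]) (hstep.1 hb)
    · have hb' : bViable (word ++ [c]) = false := by simpa using hb
      have hr := hstep.2 hb'
      have hA : subjectLoop state word (c :: t) = ("reject", word ++ [c]) := by
        simp [subjectLoop, hne, hr, subjectLoop_reject]
      have hB : bLoop word (c :: t) = word ++ [c] := by simp [bLoop, hb']
      rw [hA, hB]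
      exact ⟨rfl, by rw [reject_word_not_mem (word ++ [c]) hb']; rfl⟩

-- ===== VERDICT (by name: the statement is the Claim_ definition above) =====
theorem subject_spec : Claim_equal_subject := by
  intro s _
  unfold Spec_subject subject subject_alt
  obtain ⟨h2, h1⟩ := loop_eq s.toList "q0" [] (by decide)
  rcases hE : subjectLoop "q0" [] s.toList with ⟨st, w⟩
  rw [hE] at h2 h1
  simp_all
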